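-- pv_equiv track=rewrite | github.com/a-cold-bird/CPA_crd_manager | simple_register.py | _filter_relevant_logs
-- ===== SOURCE A (Python) =====
-- from typing import Any, Dict, List
--
-- def _filter_relevant_logs(raw_text: str) -> List[str]:
--     lines = []
--     for line in str(raw_text or "").splitlines():
--         text = line.strip()
--         if not text:
--             continue
--         if "HTTP Request: GET http://127.0.0.1:19000/api/v1/mailbox/" in text:
--             continue
--         lower = text.lower()
--         if (
--             "[oauth]" in lower
--             or "authorization_code" in lower
--             or "add-phone" in lower
--             or "consent" in lower
--         ):
--             lines.append(text)
--     return lines[-30:]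
-- ===== SOURCE B (Python) =====
-- def _filter_relevant_logs(raw_text):
--     buf = []
--     for line in reversed(str(raw_text or "").splitlines()):
--         text = line.strip()
--         if not text:
--             continue
--         if "HTTP Request: GET http://127.0.0.1:19000/api/v1/mailbox/" in text:
--             continue
--         lower = text.lower()
--         if (
--             "[oauth]" in lower
--             or "authorization_code" in lower
--             or "add-phone" in lower
--             or "consent" in lower
--         ):
--             buf.append(text)
--             if len(buf) == 30:
--                 break
--     return buf[::-1]
-- ===== Notes on version B (the rewrite author's own statement) =====
-- stated objective: alternative
-- what changed: B scans the lines back-to-front with an early break once 30 matches are collected and reverses the buffer at the end, instead of A's full forward pass followed by a [-30:] slice.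
import Mathlib
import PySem

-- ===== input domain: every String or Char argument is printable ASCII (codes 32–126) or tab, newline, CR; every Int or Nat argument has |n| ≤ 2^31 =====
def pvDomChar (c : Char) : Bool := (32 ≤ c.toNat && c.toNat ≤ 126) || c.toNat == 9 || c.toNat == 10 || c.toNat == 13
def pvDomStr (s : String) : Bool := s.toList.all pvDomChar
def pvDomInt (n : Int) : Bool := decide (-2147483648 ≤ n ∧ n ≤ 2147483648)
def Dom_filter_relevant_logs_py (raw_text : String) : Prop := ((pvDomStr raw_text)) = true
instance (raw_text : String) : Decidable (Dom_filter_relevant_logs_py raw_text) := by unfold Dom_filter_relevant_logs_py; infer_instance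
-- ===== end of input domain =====

-- B scans the lines back-to-front with an early break after 30 matches and reverses at the end,
-- instead of A's full forward pass followed by a [-30:] slice; same return value, alternative structure.


-- ===== PORT A =====
def filter_relevant_logs_py (raw_text : String) : List String :=
  let s := if raw_text == "" then "" else raw_text   -- str(raw_text or "")
  let lines := (PySem.Str.splitlines s).foldl (fun acc line =>
    let text := PySem.Str.strip line
    if text == "" then acc
    else if PySem.Str.isIn "HTTP Request: GET http://127.0.0.1:19000/api/v1/mailbox/" text then acc
    else
      let lower := PySem.Str.lower text
      if PySem.Str.isIn "[oauth]" lower || PySem.Str.isIn "authorization_code" lower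
          || PySem.Str.isIn "add-phone" lower || PySem.Str.isIn "consent" lower then
        acc ++ [text]
      else acc) []
  PySem.List.slice lines (some (-30)) none   -- lines[-30:]

-- ===== PORT B =====
-- the reversed-iteration loop of Source B: collect stripped accepted lines, break at 30
def pvGoB : List String → List String → List String
  | [], buf => buf
  | line :: rest, buf =>
    let text := PySem.Str.strip line
    if text == "" then pvGoB rest buf
    else if PySem.Str.isIn "HTTP Request: GET http://127.0.0.1:19000/api/v1/mailbox/" text then pvGoB rest buf
    else
      let lower := PySem.Str.lower text
      if PySem.Str.isIn "[oauth]" lower || PySem.Str.isIn "authorization_code" lower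
          || PySem.Str.isIn "add-phone" lower || PySem.Str.isIn "consent" lower then
        let buf' := buf ++ [text]
        if buf'.length == 30 then buf' else pvGoB rest buf'
      else pvGoB rest buf

def filter_relevant_logs_py_alt (raw_text : String) : List String :=
  let s := if raw_text == "" then "" else raw_text   -- str(raw_text or "")
  let buf := pvGoB (PySem.Str.splitlines s).reverse []
  (PySem.List.slice? buf none none (-1)).getD []   -- buf[::-1]

-- ===== PRECONDITION & SPEC =====
def Spec_filter_relevant_logs_py (raw_text : String) (out : List String) : Prop := out = filter_relevant_logs_py_alt raw_text
instance (raw_text : String) (out : List String) : Decidable (Spec_filter_relevant_logs_py raw_text out) := by unfold Spec_filter_relevant_logs_py; infer_instance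

-- ===== CLAIM (what is proved, stated in full; the proofs are below) =====
def Claim_equal_filter_relevant_logs_py : Prop := ∀ (raw_text : String), Dom_filter_relevant_logs_py raw_text → Spec_filter_relevant_logs_py raw_text (filter_relevant_logs_py raw_text)

-- ===== LEMMAS AND PROOFS =====

-- the common per-line acceptance function: some (stripped line) iff both loops keep the line
def pvKeep (line : String) : Option String :=
  let text := PySem.Str.strip line
  if text == "" then none
  else if PySem.Str.isIn "HTTP Request: GET http://127.0.0.1:19000/api/v1/mailbox/" text then none
  else if PySem.Str.isIn "[oauth]" (PySem.Str.lower text) || PySem.Str.isIn "authorization_code" (PySem.Str.lower text)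
      || PySem.Str.isIn "add-phone" (PySem.Str.lower text) || PySem.Str.isIn "consent" (PySem.Str.lower text) then
    some text
  else none

theorem pvStepA (acc : List String) (line : String) :
    (fun (acc : List String) (line : String) =>
      let text := PySem.Str.strip line
      if text == "" then acc
      else if PySem.Str.isIn "HTTP Request: GET http://127.0.0.1:19000/api/v1/mailbox/" text then acc
      else
        let lower := PySem.Str.lower text
        if PySem.Str.isIn "[oauth]" lower || PySem.Str.isIn "authorization_code" lower
            || PySem.Str.isIn "add-phone" lower || PySem.Str.isIn "consent" lower then
          acc ++ [text]
        else acc) acc line = acc ++ (pvKeep line).toList := by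
  simp only [pvKeep]
  split_ifs <;> simp

theorem pvFoldStep (f : List String → String → List String)
    (hf : ∀ acc line, f acc line = acc ++ (pvKeep line).toList)
    (l : List String) (acc : List String) :
    l.foldl f acc = acc ++ l.filterMap pvKeep := by
  induction l generalizing acc with
  | nil => simp
  | cons line rest ih =>
    rw [List.foldl_cons, hf, List.filterMap_cons, ih]
    cases hk : pvKeep line <;> simp

theorem pvGoB_cons (line : String) (rest : List String) (buf : List String) :
    pvGoB (line :: rest) buf =
      match pvKeep line with
      | none => pvGoB rest buf
      | some t => if (buf ++ [t]).length == 30 then buf ++ [t] else pvGoB rest (buf ++ [t]) := by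
  simp only [pvGoB, pvKeep]
  split_ifs <;> first | rfl | (simp [*]; intro h'; exfalso; simp_all)

theorem pvGoB_spec (l : List String) (buf : List String) (h : buf.length < 30) :
    pvGoB l buf = buf ++ (l.filterMap pvKeep).take (30 - buf.length) := by
  induction l generalizing buf with
  | nil => simp [pvGoB]
  | cons line rest ih =>
    rw [pvGoB_cons, List.filterMap_cons]
    cases hk : pvKeep line with
    | none =>
      dsimp only
      simpa using ih buf h
    | some t =>
      dsimp only
      by_cases h30 : (buf ++ [t]).length = 30
      · rw [if_pos (by simp at h30 ⊢; omega)]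
        have h1 : 30 - buf.length = 1 := by simp at h30; omega
        simp [h1]
      · have hb2 : (buf ++ [t]).length < 30 := by simp at h30 ⊢; omega
        rw [if_neg (by simp at h30 ⊢; omega), ih _ hb2]
        have hs : 30 - buf.length = (30 - (buf ++ [t]).length) + 1 := by simp; omega
        rw [hs, List.take_succ_cons]
        simp

theorem pvRevTake (l : List String) :
    ((l.reverse.take 30)).reverse = l.drop (l.length - 30) := by
  rw [List.take_reverse]
  simp

theorem filter_relevant_logs_py_spec : Claim_equal_filter_relevant_logs_py := by
  intro raw_text _
  unfold Spec_filter_relevant_logs_py filter_relevant_logs_py filter_relevant_logs_py_alt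
  simp only [pvFoldStep _ pvStepA, List.nil_append, pvGoB_spec _ [] (by norm_num),
    List.length_nil, Nat.sub_zero, PySem.List.slice?_none_none_neg_one, Option.getD_some,
    List.filterMap_reverse]
  rw [PySem.List.slice_from_neg_ofNat _ 30 (by norm_num), pvRevTake]
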